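-- pv_equiv track=rewrite | github.com/wanchunsu/HV_PPI_interface_evolution | scripts/merge_int_res_on_same_chain.py | get_lists_of_targ_seqs_and_pdb_ids
-- ===== SOURCE A (Python) =====
-- def get_lists_of_targ_seqs_and_pdb_ids(exo_dict, endo_dict):
-- 	""" Get lists of target sequences and corresponding pdb ids in exogenous and endogenous dicts
-- 	"""
-- 	list_of_targ_prots = []
-- 	list_of_pdb_chains = []
--
-- 	for targ_prot in exo_dict:
-- 		if targ_prot not in list_of_targ_prots:
-- 			list_of_targ_prots.append(targ_prot)
-- 		for pdb_chain in exo_dict[targ_prot]: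
--
-- 			if pdb_chain not in list_of_pdb_chains:
-- 				list_of_pdb_chains.append(pdb_chain)
--
-- 	for targ_prot in endo_dict:
-- 		if targ_prot not in list_of_targ_prots:
-- 			list_of_targ_prots.append(targ_prot)
-- 		for pdb_chain in endo_dict[targ_prot]:
-- 			if pdb_chain not in list_of_pdb_chains:
-- 				list_of_pdb_chains.append(pdb_chain)
--
-- 	return list_of_targ_prots, list_of_pdb_chains
-- ===== SOURCE B (Python) =====
-- def get_lists_of_targ_seqs_and_pdb_ids(exo_dict, endo_dict):
--     """ Get lists of target sequences and corresponding pdb ids in exogenous and endogenous dicts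
--     """
--     def uniq(xs):
--         # partition dedup: emit the head, drop all its other occurrences, repeat
--         out = []
--         while xs:
--             head = xs[0]
--             out.append(head)
--             xs = [y for y in xs[1:] if y != head]
--         return out
--
--     prots = uniq(list(exo_dict) + list(endo_dict))
--     chains = uniq([c for v in list(exo_dict.values()) + list(endo_dict.values()) for c in v])
--     return prots, chains
-- ===== Notes on version B (the rewrite author's own statement) =====
-- stated objective: alternative
-- what changed: Replaces A's scan that tests membership in the growing output lists with a partition dedup: repeatedly emit the head of the (concatenated/flattened) input and filter all its remaining occurrences out of the input, so no seen-so-far membership structure exists.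
import Mathlib
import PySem

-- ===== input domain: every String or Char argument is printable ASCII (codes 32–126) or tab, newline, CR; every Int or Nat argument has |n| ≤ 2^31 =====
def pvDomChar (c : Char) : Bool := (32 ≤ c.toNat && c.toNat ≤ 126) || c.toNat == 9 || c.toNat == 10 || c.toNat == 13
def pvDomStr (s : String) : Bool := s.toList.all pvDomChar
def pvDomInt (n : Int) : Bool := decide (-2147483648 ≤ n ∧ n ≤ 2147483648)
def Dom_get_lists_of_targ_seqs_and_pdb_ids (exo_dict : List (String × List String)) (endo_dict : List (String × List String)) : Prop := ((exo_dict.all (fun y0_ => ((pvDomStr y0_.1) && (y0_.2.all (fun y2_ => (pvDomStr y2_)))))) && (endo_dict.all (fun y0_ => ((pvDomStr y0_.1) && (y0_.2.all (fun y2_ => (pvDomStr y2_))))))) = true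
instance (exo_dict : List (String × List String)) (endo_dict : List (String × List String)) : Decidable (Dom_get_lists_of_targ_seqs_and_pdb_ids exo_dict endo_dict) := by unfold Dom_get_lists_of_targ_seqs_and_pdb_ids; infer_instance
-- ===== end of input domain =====

/- B replaces A's seen-so-far membership scan by a partition dedup (emit head, filter its
   occurrences out of the rest, repeat) over the concatenated keys / flattened values;
   alternative decomposition, return value only. -/
-- ===== PORT A =====
-- one fold over the pairs; 'x not in list: append' is the membership-guarded append
def pvStepA (acc : List String × List String) (kv : String × List String) : List String × List String :=
  (if acc.1.contains kv.1 then acc.1 else acc.1 ++ [kv.1],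
   kv.2.foldl (fun cs c => if cs.contains c then cs else cs ++ [c]) acc.2)

def get_lists_of_targ_seqs_and_pdb_ids (exo_dict : List (String × List String)) (endo_dict : List (String × List String)) : List String × List String :=
  let s := exo_dict.foldl pvStepA ([], [])
  endo_dict.foldl pvStepA s

-- ===== PORT B =====
-- the 'while xs: out.append(xs[0]); xs = [y for y in xs[1:] if y != xs[0]]' loop
def pvUniq (xs : List String) : List String :=
  match xs with
  | [] => []
  | x :: t => x :: pvUniq (t.filter (fun y => y != x))
termination_by xs.length
decreasing_by simpa using Nat.lt_succ_of_le (List.length_filter_le _ _)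

def get_lists_of_targ_seqs_and_pdb_ids_alt (exo_dict : List (String × List String)) (endo_dict : List (String × List String)) : List String × List String :=
  (pvUniq (exo_dict.map Prod.fst ++ endo_dict.map Prod.fst),
   pvUniq ((exo_dict.map Prod.snd ++ endo_dict.map Prod.snd).flatMap id))

-- ===== PRECONDITION & SPEC =====
def Spec_get_lists_of_targ_seqs_and_pdb_ids (exo_dict : List (String × List String)) (endo_dict : List (String × List String)) (out : List String × List String) : Prop := out = get_lists_of_targ_seqs_and_pdb_ids_alt exo_dict endo_dict
instance (exo_dict : List (String × List String)) (endo_dict : List (String × List String)) (out : List String × List String) : Decidable (Spec_get_lists_of_targ_seqs_and_pdb_ids exo_dict endo_dict out) := by unfold Spec_get_lists_of_targ_seqs_and_pdb_ids; infer_instance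

-- ===== CLAIM =====
def Claim_equal_get_lists_of_targ_seqs_and_pdb_ids : Prop := ∀ (exo_dict : List (String × List String)) (endo_dict : List (String × List String)), Dom_get_lists_of_targ_seqs_and_pdb_ids exo_dict endo_dict → Spec_get_lists_of_targ_seqs_and_pdb_ids exo_dict endo_dict (get_lists_of_targ_seqs_and_pdb_ids exo_dict endo_dict)

-- ===== LEMMAS AND PROOFS =====
-- the pairwise fold splits into two independent folds
theorem pvStepA_split (l : List (String × List String)) (a b : List String) :
    l.foldl pvStepA (a, b) =
      (l.foldl (fun ps kv => PySem.Set.add ps kv.1) a,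
       l.foldl (fun cs kv => kv.2.foldl PySem.Set.add cs) b) := by
  induction l generalizing a b with
  | nil => rfl
  | cons kv t ih =>
    rw [List.foldl_cons,
      show pvStepA (a, b) kv = (PySem.Set.add a kv.1, kv.2.foldl PySem.Set.add b) from rfl, ih]
    rfl

-- the membership-guarded append fold equals the partition dedup of what is not yet in acc
theorem foldl_add_eq_uniq (xs acc : List String) :
    xs.foldl PySem.Set.add acc = acc ++ pvUniq (xs.filter (fun y => !acc.contains y)) := by
  induction xs generalizing acc with
  | nil => simp [pvUniq]
  | cons x t ih =>
    rw [List.foldl_cons]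
    by_cases hx : x ∈ acc
    · have ha : PySem.Set.add acc x = acc := by simp [PySem.Set.add, hx]
      have hc : List.filter (fun y => !acc.contains y) (x :: t)
          = List.filter (fun y => !acc.contains y) t := by simp [hx]
      rw [ha, ih, hc]
    · have ha : PySem.Set.add acc x = acc ++ [x] := by simp [PySem.Set.add, hx]
      have hf : List.filter (fun y => !(acc ++ [x]).contains y) t
          = List.filter (fun y => y != x) (List.filter (fun y => !acc.contains y) t) := by
        rw [List.filter_filter]
        refine List.filter_congr ?_
        intro y _
        by_cases hyx : y = x <;> by_cases hya : y ∈ acc <;> simp [hyx, hya, bne]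
      have hc : List.filter (fun y => !acc.contains y) (x :: t)
          = x :: List.filter (fun y => !acc.contains y) t := by simp [hx]
      rw [ha, ih, hf, hc, pvUniq]
      simp

theorem foldl_add_eq_uniq_nil (xs : List String) :
    xs.foldl PySem.Set.add [] = pvUniq xs := by
  simpa using foldl_add_eq_uniq xs []

-- ===== VERDICT =====
theorem get_lists_of_targ_seqs_and_pdb_ids_spec : Claim_equal_get_lists_of_targ_seqs_and_pdb_ids := by
  intro exo endo _
  show _ = _
  simp only [get_lists_of_targ_seqs_and_pdb_ids, get_lists_of_targ_seqs_and_pdb_ids_alt,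
    ← List.foldl_append, pvStepA_split, ← foldl_add_eq_uniq_nil, ← List.map_append,
    List.foldl_map, List.foldl_flatMap, id]
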